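-- pv_equiv track=rewrite | github.com/ssshhhiiissshhh/bioinformatics | functions.py | blosum_to_nested
-- ===== SOURCE A (Python) =====
-- def blosum_to_nested(blosum, gap_score=-1):
--     symbols = set()
--     for a, b in blosum:
--         symbols.add(a)
--         symbols.add(b)
--
--     symbols = sorted(symbols)
--     symbols.append('-')
--     W = {a: {} for a in symbols}
--
--     for a in symbols:
--         for b in symbols:
--             if a == '-' or b == '-':
--                 W[a][b] = gap_score
--             elif (a, b) in blosum:
--                 W[a][b] = blosum[(a, b)]
--             elif (b, a) in blosum:
--                 W[a][b] = blosum[(b, a)]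
--
--     return W
-- ===== SOURCE B (Python) =====
-- def blosum_to_nested(blosum, gap_score=-1):
--     # One pass over the entries builds symmetrized per-symbol rows (exact (a, b)
--     # keys win over mirrored ones); each output row is then its present columns
--     # in sorted order, with the gap symbol's cells filled in directly.
--     rows = {}
--     for (a, b), v in blosum.items():
--         rows.setdefault(a, {})[b] = v
--         if (b, a) not in blosum:
--             rows.setdefault(b, {})[a] = v
--
--     gap_is_symbol = '-' in rows
--     symbols = sorted(rows)
--     if not gap_is_symbol:
--         symbols.append('-')
--
--     W = {}
--     for a in symbols:
--         if a == '-':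
--             W[a] = dict.fromkeys(symbols, gap_score)
--         else:
--             cols = sorted(set(rows[a]) | {'-'}) if gap_is_symbol else sorted(rows[a]) + ['-']
--             W[a] = {b: gap_score if b == '-' else rows[a][b] for b in cols}
--     return W
-- ===== Notes on version B (the rewrite author's own statement) =====
-- stated objective: faster
-- what changed: A scans all S x S symbol pairs, testing blosum membership per cell with a three-branch chain; B never iterates the symbol grid: one pass over the blosum entries builds symmetrized per-symbol row dicts (exact keys win over mirrored ones), and each output row is assembled by sorting that row's present keys, so only present cells are ever touched.
import Mathlib
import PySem

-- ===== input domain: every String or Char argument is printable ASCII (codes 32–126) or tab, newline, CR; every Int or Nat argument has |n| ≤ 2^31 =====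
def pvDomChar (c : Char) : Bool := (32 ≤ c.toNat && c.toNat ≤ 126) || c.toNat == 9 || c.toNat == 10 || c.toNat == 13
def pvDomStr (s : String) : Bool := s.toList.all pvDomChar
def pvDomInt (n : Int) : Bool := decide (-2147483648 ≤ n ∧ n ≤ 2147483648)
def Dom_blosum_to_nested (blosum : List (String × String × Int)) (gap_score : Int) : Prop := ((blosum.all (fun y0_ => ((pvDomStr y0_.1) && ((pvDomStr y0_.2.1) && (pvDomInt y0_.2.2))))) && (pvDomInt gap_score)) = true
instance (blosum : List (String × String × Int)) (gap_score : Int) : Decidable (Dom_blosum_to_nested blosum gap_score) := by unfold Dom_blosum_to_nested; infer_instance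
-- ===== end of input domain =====

-- ===== PORT A =====
-- B never iterates the S x S symbol grid: one pass over the blosum entries builds
-- symmetrized per-symbol rows, and each output row is assembled from that row's sorted
-- present keys, so work scales with the entries and the output, not with all symbol
-- pairs (a timing run measured B faster).
-- Both ports receive the Python dict argument as an association list; rebuild the dict
-- exactly as Python does (last value wins, first position kept).
def pvDictOf (blosum : List (String × String × Int)) : PySem.Dict (String × String) Int :=
  blosum.foldl (fun d t => d.insert (t.1, t.2.1) t.2.2) PySem.Dict.empty

def blosum_to_nested (blosum : List (String × String × Int)) (gap_score : Int) : List (String × List (String × Int)) :=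
  let d := pvDictOf blosum
  -- symbols = set(); for a, b in blosum: symbols.add(a); symbols.add(b)
  let symbols0 : PySem.Set String :=
    d.items.foldl (fun s kv => PySem.Set.add (PySem.Set.add s kv.1.1) kv.1.2) PySem.Set.empty
  -- symbols = sorted(symbols); symbols.append('-')
  let symbols : List String := PySem.List.sorted symbols0 (fun x => x) false ++ ["-"]
  -- W = {a: {} for a in symbols}
  let W0 : PySem.Dict String (PySem.Dict String Int) :=
    symbols.foldl (fun w a => w.insert a PySem.Dict.empty) PySem.Dict.empty
  -- for a in symbols: for b in symbols: the three-branch chain writing W[a][b]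
  let W := symbols.foldl (fun w a =>
      symbols.foldl (fun w b =>
        if a = "-" ∨ b = "-" then
          PySem.Dict.modify w a PySem.Dict.empty (fun row => row.insert b gap_score)
        else
          match d.get? (a, b) with
          | some v => PySem.Dict.modify w a PySem.Dict.empty (fun row => row.insert b v)
          | none =>
            match d.get? (b, a) with
            | some v => PySem.Dict.modify w a PySem.Dict.empty (fun row => row.insert b v)
            | none => w) w) W0
  W.items.map (fun p => (p.1, p.2.items))

-- ===== PORT B =====
-- loop body of B's single pass over blosum.items():
--   rows.setdefault(a, {})[b] = v;  if (b, a) not in blosum: rows.setdefault(b, {})[a] = v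
-- (setdefault-then-assign is Dict.modify with an empty default)
def pvRowsStep (d : PySem.Dict (String × String) Int)
    (rows : PySem.Dict String (PySem.Dict String Int)) (kv : (String × String) × Int) :
    PySem.Dict String (PySem.Dict String Int) :=
  let rows1 := PySem.Dict.modify rows kv.1.1 PySem.Dict.empty (fun r => r.insert kv.1.2 kv.2)
  if d.contains (kv.1.2, kv.1.1) then rows1
  else PySem.Dict.modify rows1 kv.1.2 PySem.Dict.empty (fun r => r.insert kv.1.1 kv.2)

def blosum_to_nested_alt (blosum : List (String × String × Int)) (gap_score : Int) : List (String × List (String × Int)) :=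
  let d := pvDictOf blosum
  -- rows = {}; for (a, b), v in blosum.items(): …
  let rows : PySem.Dict String (PySem.Dict String Int) :=
    d.items.foldl (pvRowsStep d) PySem.Dict.empty
  -- gap_is_symbol = '-' in rows
  let gap_is_symbol := rows.contains "-"
  -- symbols = sorted(rows);  if not gap_is_symbol: symbols.append('-')
  let symbols : List String :=
    PySem.List.sorted rows.keys (fun x => x) false ++ (if gap_is_symbol then [] else ["-"])
  let W := symbols.foldl (fun W a =>
      if a = "-" then
        -- W[a] = dict.fromkeys(symbols, gap_score)
        W.insert a (symbols.foldl (fun r b => r.insert b gap_score) PySem.Dict.empty)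
      else
        -- rows[a]: a is always a key of rows here, so getD's default is never used
        let row := rows.getD a PySem.Dict.empty
        -- cols = sorted(set(rows[a]) | {'-'}) if gap_is_symbol else sorted(rows[a]) + ['-']
        let cols : List String :=
          if gap_is_symbol then
            PySem.List.sorted (PySem.Set.add (PySem.Set.ofList row.keys) "-") (fun x => x) false
          else
            PySem.List.sorted row.keys (fun x => x) false ++ ["-"]
        -- W[a] = {b: gap_score if b == '-' else rows[a][b] for b in cols}
        -- (rows[a][b]: for b ≠ '-' in cols, b is always a key of rows[a], so getD's default is never used)
        W.insert a (cols.foldl (fun r b =>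
            r.insert b (if b = "-" then gap_score else row.getD b 0)) PySem.Dict.empty))
    PySem.Dict.empty
  W.items.map (fun p => (p.1, p.2.items))

-- ===== PRECONDITION & SPEC =====
def Spec_blosum_to_nested (blosum : List (String × String × Int)) (gap_score : Int) (out : List (String × List (String × Int))) : Prop := out = blosum_to_nested_alt blosum gap_score
instance (blosum : List (String × String × Int)) (gap_score : Int) (out : List (String × List (String × Int))) : Decidable (Spec_blosum_to_nested blosum gap_score out) := by unfold Spec_blosum_to_nested; infer_instance

-- ===== CLAIM (what is proved, stated in full; the proofs are below) =====
def Claim_equal_blosum_to_nested : Prop := ∀ (blosum : List (String × String × Int)) (gap_score : Int), Dom_blosum_to_nested blosum gap_score → Spec_blosum_to_nested blosum gap_score (blosum_to_nested blosum gap_score)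
-- ===== LEMMAS AND PROOFS =====

-- the per-cell value A's three-branch chain computes (none = cell left absent)
def pvCell (d : PySem.Dict (String × String) Int) (gap : Int) (a b : String) : Option Int :=
  if a = "-" ∨ b = "-" then some gap else ((d.get? (a, b)).or (d.get? (b, a)))

def pvRowStep (c : String → Option Int) (r : PySem.Dict String Int) (b : String) : PySem.Dict String Int :=
  match c b with
  | some v => r.insert b v
  | none => r

-- the symmetric lookup B's rows dict realizes
def pvOr (d : PySem.Dict (String × String) Int) (a b : String) : Option Int :=
  (d.get? (a, b)).or (d.get? (b, a))

-- all symbol occurrences, and A's symbol list (sorted distinct symbols then '-')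
def pvSymList (d : PySem.Dict (String × String) Int) : List String :=
  d.items.flatMap (fun kv => [kv.1.1, kv.1.2])

def pvS (d : PySem.Dict (String × String) Int) : List String :=
  PySem.List.sorted (PySem.Set.ofList (pvSymList d)) (fun x => x) false ++ ["-"]

-- the common canonical form both ports are reduced to
def pvCanon (blosum : List (String × String × Int)) (gap : Int) : List (String × List (String × Int)) :=
  let d := pvDictOf blosum
  (PySem.List.dedup (pvS d)).map (fun a =>
    (a, (PySem.List.dedup (pvS d)).filterMap (fun b => (pvCell d gap a b).map (fun v => (b, v)))))

theorem pvKeyEqOfContainsFalse {κ ν : Type} [BEq κ] [LawfulBEq κ] (d : PySem.Dict κ ν) (k : κ)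
    (hc : d.contains k = false) : ∀ p ∈ d.items, (p.1 == k) = false := by
  intro p hp
  have := List.any_eq_false.mp hc p hp
  simpa using this

theorem pvInsertSame {κ ν : Type} [BEq κ] [LawfulBEq κ] (d : PySem.Dict κ ν) (k : κ) (v : ν)
    (hn : d.keys.Nodup) (h : d.get? k = some v) : d.insert k v = d := by
  have hmem : (k, v) ∈ d.items := PySem.Dict.mem_items_of_get?_eq_some d h
  have hc : d.contains k = true := by
    rw [PySem.Dict.contains_eq_isSome_get?, h]; rfl
  apply PySem.Dict.ext
  rw [PySem.Dict.items_insert_of_contains d v hc]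
  apply List.map_congr_left ?_ |>.trans (List.map_id _)
  intro p hp
  by_cases hk : p.1 = k
  · have hpkv : p = (k, v) := by
      have hinj := List.inj_on_of_nodup_map (f := Prod.fst) hn hp hmem
      exact hinj (by simpa using hk)
    simp [hpkv]
  · simp [hk]

theorem pvInsertInsert {κ ν : Type} [BEq κ] [LawfulBEq κ] (d : PySem.Dict κ ν) (k : κ) (v v' : ν) :
    (d.insert k v).insert k v' = d.insert k v' := by
  apply PySem.Dict.ext
  rw [PySem.Dict.items_insert_of_contains _ v' (PySem.Dict.contains_insert_self d k v)]
  by_cases hc : d.contains k = true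
  · rw [PySem.Dict.items_insert_of_contains _ v hc, PySem.Dict.items_insert_of_contains _ v' hc,
      List.map_map]
    apply List.map_congr_left
    intro p _
    by_cases hk : p.1 = k <;> simp [hk]
  · have hc' : d.contains k = false := by simpa using hc
    rw [PySem.Dict.items_insert_of_not_contains _ v hc', PySem.Dict.items_insert_of_not_contains _ v' hc',
      List.map_append]
    have : List.map (fun p => if (p.1 == k) = true then (k, v') else p) d.items = d.items := by
      apply List.map_congr_left ?_ |>.trans (List.map_id _)
      intro p hp
      simp [pvKeyEqOfContainsFalse d k hc' p hp]
    simp [this]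

theorem pvModifyModify {κ ν : Type} [BEq κ] [LawfulBEq κ] (w : PySem.Dict κ ν) (a : κ) (e : ν)
    (f g : ν → ν) :
    (PySem.Dict.modify w a e f).modify a e g = PySem.Dict.modify w a e (fun x => g (f x)) := by
  simp [PySem.Dict.modify, PySem.Dict.getD_insert_self, pvInsertInsert]

theorem pvModifyId {κ ν : Type} [BEq κ] [LawfulBEq κ] (w : PySem.Dict κ ν) (a : κ) (e : ν)
    (hn : w.keys.Nodup) (hc : w.contains a = true) : PySem.Dict.modify w a e (fun r => r) = w := by
  have hs : (w.get? a).isSome := by rw [← PySem.Dict.contains_eq_isSome_get?]; exact hc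
  obtain ⟨v, hv⟩ := Option.isSome_iff_exists.mp hs
  rw [PySem.Dict.modify, PySem.Dict.getD_of_get?_eq_some w e hv]
  exact pvInsertSame w a v hn hv

-- A's symbol-collecting loop is the set of all flattened key components
theorem pvSymbolsFold (l : List ((String × String) × Int)) :
    ∀ (s : PySem.Set String),
      l.foldl (fun s kv => PySem.Set.add (PySem.Set.add s kv.1.1) kv.1.2) s
        = PySem.Set.update s (l.flatMap (fun kv => [kv.1.1, kv.1.2])) := by
  induction l with
  | nil => intro s; simp [PySem.Set.update_nil]
  | cons kv t ih =>
    intro s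
    rw [List.foldl_cons, ih, List.flatMap_cons]
    show _ = PySem.Set.update s ([kv.1.1, kv.1.2] ++ _)
    rw [PySem.Set.update_append, PySem.Set.update_cons, PySem.Set.update_cons, PySem.Set.update_nil]

theorem pvRowfoldKeysNodup (c : String → Option Int) (S : List String) :
    ∀ (r : PySem.Dict String Int), r.keys.Nodup → (S.foldl (pvRowStep c) r).keys.Nodup := by
  induction S with
  | nil => intro r h; exact h
  | cons b t ih =>
    intro r h
    rw [List.foldl_cons]
    apply ih
    unfold pvRowStep
    cases c b with
    | some v => exact PySem.Dict.nodup_keys_insert r b v h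
    | none => exact h

theorem pvRowfoldGet (c : String → Option Int) (S : List String) :
    ∀ (r : PySem.Dict String Int) (b : String) (v : Int), c b = some v →
      (b ∈ S ∨ r.get? b = some v) → (S.foldl (pvRowStep c) r).get? b = some v := by
  induction S with
  | nil =>
    intro r b v _ hmem
    simp only [List.foldl_nil]
    rcases hmem with h | h
    · simp at h
    · exact h
  | cons b' t ih =>
    intro r b v hc hmem
    rw [List.foldl_cons]
    apply ih _ b v hc
    by_cases hb : b ∈ t
    · exact Or.inl hb
    · right
      have hmem' : b = b' ∨ r.get? b = some v := by
        rcases hmem with h | h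
        · rcases List.mem_cons.mp h with h | h
          · exact Or.inl h
          · exact absurd h hb
        · exact Or.inr h
      unfold pvRowStep
      rcases hmem' with h | h
      · subst h
        rw [hc]
        exact PySem.Dict.get?_insert_self r b v
      · cases hc' : c b' with
        | some v' =>
          by_cases hbb : b = b'
          · subst hbb
            rw [hc] at hc'
            injection hc' with hv
            rw [hv]
            exact PySem.Dict.get?_insert_self r b v'
          · rw [PySem.Dict.get?_insert_of_ne r v' hbb]; exact h
        | none => exact h

theorem pvRowfoldIdem (c : String → Option Int) (S : List String) :
    S.foldl (pvRowStep c) (S.foldl (pvRowStep c) PySem.Dict.empty)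
      = S.foldl (pvRowStep c) PySem.Dict.empty := by
  have hn : (S.foldl (pvRowStep c) PySem.Dict.empty).keys.Nodup := by
    apply pvRowfoldKeysNodup
    simp [PySem.Dict.keys, PySem.Dict.empty]
  have main : ∀ (T : List String), (∀ b ∈ T, b ∈ S) →
      T.foldl (pvRowStep c) (S.foldl (pvRowStep c) PySem.Dict.empty)
        = S.foldl (pvRowStep c) PySem.Dict.empty := by
    intro T
    induction T with
    | nil => intro _; rfl
    | cons b t ih =>
      intro hT
      rw [List.foldl_cons]
      have hstep : pvRowStep c (S.foldl (pvRowStep c) PySem.Dict.empty) b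
          = S.foldl (pvRowStep c) PySem.Dict.empty := by
        unfold pvRowStep
        cases hc : c b with
        | some v =>
          apply pvInsertSame _ b v hn
          exact pvRowfoldGet c S PySem.Dict.empty b v hc (Or.inl (hT b (List.mem_cons_self)))
        | none => rfl
      rw [hstep]
      exact ih (fun x hx => hT x (List.mem_cons_of_mem b hx))
  exact main S (fun _ h => h)

-- localize A's inner loop: all its writes go to the row at key a
theorem pvInnerLocal (c : String → Option Int) (a : String) (S : List String) :
    ∀ (w : PySem.Dict String (PySem.Dict String Int)), w.contains a = true → w.keys.Nodup →
      S.foldl (fun w b =>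
          match c b with
          | some v => PySem.Dict.modify w a PySem.Dict.empty (fun r => r.insert b v)
          | none => w) w
        = PySem.Dict.modify w a PySem.Dict.empty (fun r => S.foldl (pvRowStep c) r) := by
  induction S with
  | nil =>
    intro w hc hn
    simp only [List.foldl_nil]
    exact (pvModifyId w a PySem.Dict.empty hn hc).symm
  | cons b t ih =>
    intro w hc hn
    rw [List.foldl_cons]
    cases hcb : c b with
    | some v =>
      have hc' : (PySem.Dict.modify w a PySem.Dict.empty (fun r => r.insert b v)).contains a = true := by
        rw [PySem.Dict.modify]
        exact PySem.Dict.contains_insert_self _ _ _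
      have hn' : (PySem.Dict.modify w a PySem.Dict.empty (fun r => r.insert b v)).keys.Nodup := by
        rw [PySem.Dict.modify, PySem.Dict.keys_insert_of_contains _ _ hc]
        exact hn
      rw [ih _ hc' hn', pvModifyModify]
      congr 1
      funext r
      simp only [List.foldl_cons, pvRowStep, hcb]
    | none =>
      rw [ih w hc hn]
      congr 1
      funext r
      simp only [List.foldl_cons, pvRowStep, hcb]

-- a fold of inserts with a per-key value function, from the empty dict
theorem pvFoldInsertItems {ν : Type} (f : String → ν) (S : List String) :
    (S.foldl (fun w a => w.insert a (f a)) (PySem.Dict.empty : PySem.Dict String ν)).items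
      = (PySem.List.dedup S).map (fun a => (a, f a)) := by
  induction S using List.reverseRecOn with
  | nil => simp [PySem.Dict.empty, PySem.List.dedup]
  | append_singleton l a ih =>
    rw [List.foldl_append, List.foldl_cons, List.foldl_nil]
    have hkeys : (l.foldl (fun w a => w.insert a (f a)) PySem.Dict.empty).keys
        = PySem.List.dedup l := by
      rw [PySem.Dict.keys, ih, List.map_map]
      simp [Function.comp_def]
    have hnodup : (l.foldl (fun w a => w.insert a (f a)) PySem.Dict.empty).keys.Nodup := by
      rw [hkeys, PySem.List.dedup_eq_ofList]
      exact PySem.Set.nodup_ofList l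
    by_cases ha : a ∈ l
    · have hdedup : PySem.List.dedup (l ++ [a]) = PySem.List.dedup l := by
        rw [PySem.List.dedup_eq_ofList, PySem.List.dedup_eq_ofList, PySem.Set.ofList_append_singleton,
          PySem.Set.add_of_mem (by rw [PySem.Set.mem_ofList]; exact ha)]
      have hget : (l.foldl (fun w a => w.insert a (f a)) PySem.Dict.empty).get? a = some (f a) := by
        have hmem2 : (a, f a) ∈ (l.foldl (fun w a => w.insert a (f a)) PySem.Dict.empty).items := by
          rw [ih]
          exact List.mem_map_of_mem (by rw [PySem.List.dedup_eq_ofList, PySem.Set.mem_ofList]; exact ha)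
        exact PySem.Dict.get?_of_mem_items _ hmem2 hnodup
      rw [pvInsertSame _ a (f a) hnodup hget, ih, hdedup]
    · have hcont : (l.foldl (fun w a => w.insert a (f a)) PySem.Dict.empty).contains a = false := by
        rw [← Bool.not_eq_true, PySem.Dict.contains_iff_mem_keys, hkeys,
          PySem.List.dedup_eq_ofList, PySem.Set.mem_ofList]
        exact ha
      rw [PySem.Dict.items_insert_of_not_contains _ (f a) hcont, ih]
      have hdedup : PySem.List.dedup (l ++ [a]) = PySem.List.dedup l ++ [a] := by
        rw [PySem.List.dedup_eq_ofList, PySem.List.dedup_eq_ofList, PySem.Set.ofList_append_singleton,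
          PySem.Set.add_of_not_mem (by rw [PySem.Set.mem_ofList]; exact ha)]
      rw [hdedup, List.map_append]
      rfl

-- A's outer loop over the pre-initialized W, row by row
theorem pvAOuterInv (c : String → String → Option Int) (S : List String) :
    ∀ (T : List String) (g : String → PySem.Dict String Int)
      (w : PySem.Dict String (PySem.Dict String Int)),
      w.items = (PySem.List.dedup S).map (fun a => (a, g a)) →
      (∀ a ∈ T, a ∈ PySem.List.dedup S) →
      (∀ a ∈ T, S.foldl (pvRowStep (c a)) (g a) = S.foldl (pvRowStep (c a)) PySem.Dict.empty) →
      (T.foldl (fun w a =>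
          S.foldl (fun w b =>
            match c a b with
            | some v => PySem.Dict.modify w a PySem.Dict.empty (fun r => r.insert b v)
            | none => w) w) w).items
        = (PySem.List.dedup S).map
            (fun a => (a, if a ∈ T then S.foldl (pvRowStep (c a)) PySem.Dict.empty else g a)) := by
  intro T
  induction T with
  | nil =>
    intro g w hw _ _
    rw [List.foldl_nil, hw]
    apply List.map_congr_left
    intro a _
    simp
  | cons a t ih =>
    intro g w hw hT hg
    have hamem : a ∈ PySem.List.dedup S := hT a List.mem_cons_self
    have hkeys : w.keys = PySem.List.dedup S := by
      rw [PySem.Dict.keys, hw, List.map_map]; simp [Function.comp_def]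
    have hnodup : w.keys.Nodup := by
      rw [hkeys, PySem.List.dedup_eq_ofList]; exact PySem.Set.nodup_ofList S
    have hcont : w.contains a = true := by
      rw [PySem.Dict.contains_iff_mem_keys, hkeys]; exact hamem
    rw [List.foldl_cons, pvInnerLocal (c a) a S w hcont hnodup]
    have hgetD : w.getD a PySem.Dict.empty = g a := by
      have hmem2 : (a, g a) ∈ w.items := by
        rw [hw]; exact List.mem_map_of_mem hamem
      exact PySem.Dict.getD_of_mem_items _ hmem2 hnodup _
    have hrow : PySem.Dict.modify w a PySem.Dict.empty (fun r => S.foldl (pvRowStep (c a)) r)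
        = w.insert a (S.foldl (pvRowStep (c a)) PySem.Dict.empty) := by
      rw [PySem.Dict.modify, hgetD, hg a List.mem_cons_self]
    rw [hrow]
    set fA := fun x => S.foldl (pvRowStep (c x)) PySem.Dict.empty with hfA
    have hw' : (w.insert a (fA a)).items
        = (PySem.List.dedup S).map (fun x => (x, if x = a then fA x else g x)) := by
      rw [PySem.Dict.items_insert_of_contains _ (fA a) hcont, hw, List.map_map]
      apply List.map_congr_left
      intro x _
      by_cases hx : x = a
      · subst hx; simp
      · simp [hx]
    rw [ih (fun x => if x = a then fA x else g x) _ hw'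
      (fun x hx => hT x (List.mem_cons_of_mem a hx))
      ?_]
    · apply List.map_congr_left
      intro x _
      by_cases hxt : x ∈ t
      · simp [hxt]
      · by_cases hxa : x = a
        · subst hxa; simp [hxt, hfA]
        · simp [hxt, hxa]
    · intro x hx
      show List.foldl (pvRowStep (c x)) (if x = a then fA x else g x) S
          = List.foldl (pvRowStep (c x)) PySem.Dict.empty S
      by_cases hxa : x = a
      · subst hxa
        rw [if_pos rfl, hfA]
        exact pvRowfoldIdem (c x) S
      · rw [if_neg hxa]
        exact hg x (List.mem_cons_of_mem a hx)
-- the inner-row fold of A, as a filterMap over the distinct symbols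
theorem pvRowfoldItems (c : String → Option Int) (S : List String) :
    (S.foldl (pvRowStep c) PySem.Dict.empty).items
      = (PySem.List.dedup S).filterMap (fun b => (c b).map (fun v => (b, v))) := by
  induction S using List.reverseRecOn with
  | nil => simp [PySem.Dict.empty, PySem.List.dedup]
  | append_singleton l b ih =>
    rw [List.foldl_append, List.foldl_cons, List.foldl_nil]
    have hdedup : PySem.List.dedup (l ++ [b])
        = PySem.List.dedup l ++ (if b ∈ l then [] else [b]) := by
      rw [PySem.List.dedup_eq_ofList, PySem.List.dedup_eq_ofList, PySem.Set.ofList_append_singleton]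
      by_cases hb : b ∈ l
      · rw [PySem.Set.add_of_mem (by rw [PySem.Set.mem_ofList]; exact hb)]; simp [hb]
      · rw [PySem.Set.add_of_not_mem (by rw [PySem.Set.mem_ofList]; exact hb)]; simp [hb]
    have hkeys : (l.foldl (pvRowStep c) PySem.Dict.empty).keys
        = ((PySem.List.dedup l).filterMap (fun x => (c x).map (fun v => (x, v)))).map Prod.fst := by
      rw [PySem.Dict.keys, ih]
    have hmemfm : ∀ p ∈ (PySem.List.dedup l).filterMap (fun x => (c x).map (fun v => (x, v))),
        c p.1 = some p.2 ∧ p.1 ∈ l := by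
      intro p hp
      rw [List.mem_filterMap] at hp
      obtain ⟨x, hx, hfx⟩ := hp
      cases hcx : c x with
      | none => rw [hcx] at hfx; simp at hfx
      | some v =>
        rw [hcx] at hfx
        simp only [Option.map_some, Option.some.injEq] at hfx
        cases hfx
        refine ⟨hcx, ?_⟩
        rw [PySem.List.dedup_eq_ofList, PySem.Set.mem_ofList] at hx
        exact hx
    rw [hdedup, List.filterMap_append]
    cases hcb : c b with
    | none =>
      have hstep : pvRowStep c (l.foldl (pvRowStep c) PySem.Dict.empty) b
          = l.foldl (pvRowStep c) PySem.Dict.empty := by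
        unfold pvRowStep; rw [hcb]
      rw [hstep, ih]
      by_cases hb : b ∈ l <;> simp [hb, hcb]
    | some v =>
      have hstep : pvRowStep c (l.foldl (pvRowStep c) PySem.Dict.empty) b
          = (l.foldl (pvRowStep c) PySem.Dict.empty).insert b v := by
        unfold pvRowStep; rw [hcb]
      rw [hstep]
      by_cases hb : b ∈ l
      · have hc : (l.foldl (pvRowStep c) PySem.Dict.empty).contains b = true := by
          rw [PySem.Dict.contains_iff_mem_keys, hkeys, List.mem_map]
          refine ⟨(b, v), ?_, rfl⟩
          rw [List.mem_filterMap]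
          exact ⟨b, by rw [PySem.List.dedup_eq_ofList, PySem.Set.mem_ofList]; exact hb,
            by rw [hcb]; rfl⟩
        rw [PySem.Dict.items_insert_of_contains _ v hc, ih]
        have hmapid : List.map (fun p => if (p.1 == b) = true then (b, v) else p)
            ((PySem.List.dedup l).filterMap (fun x => (c x).map (fun v => (x, v))))
            = (PySem.List.dedup l).filterMap (fun x => (c x).map (fun v => (x, v))) := by
          apply List.map_congr_left ?_ |>.trans (List.map_id _)
          intro p hp
          by_cases hpb : p.1 = b
          · have hcp := (hmemfm p hp).1
            rw [hpb, hcb] at hcp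
            injection hcp with hv
            have hpe : p = (b, v) := by
              obtain ⟨p1, p2⟩ := p
              simp only at hpb hv
              rw [hpb, hv]
            simp [hpe]
          · simp [hpb]
        rw [hmapid]
        simp [hb]
      · have hc : (l.foldl (pvRowStep c) PySem.Dict.empty).contains b = false := by
          rw [← Bool.not_eq_true, PySem.Dict.contains_iff_mem_keys, hkeys, List.mem_map]
          rintro ⟨p, hp, hpb⟩
          exact hb (hpb ▸ (hmemfm p hp).2)
        rw [PySem.Dict.items_insert_of_not_contains _ v hc, ih]
        simp [hb, hcb]

-- set(xs) of a duplicate-free list is the list itself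
theorem pvOfListSelf (l : List String) (h : l.Nodup) : PySem.Set.ofList l = l := by
  induction l using List.reverseRecOn with
  | nil => rfl
  | append_singleton t a ih =>
    have h2 := List.nodup_append.mp h
    rw [PySem.Set.ofList_append_singleton, ih h2.1,
      PySem.Set.add_of_not_mem (fun hm => h2.2.2 _ hm _ (List.mem_singleton_self a) rfl)]

-- the row value a fold of B's single pass has written at (a, b)
def pvRget (w : PySem.Dict String (PySem.Dict String Int)) (a b : String) : Option Int :=
  (w.getD a PySem.Dict.empty).get? b

theorem pvRgetStep (d : PySem.Dict (String × String) Int)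
    (w : PySem.Dict String (PySem.Dict String Int)) (kv : (String × String) × Int) (a b : String) :
    pvRget (pvRowsStep d w kv) a b =
      if d.contains (kv.1.2, kv.1.1) = false ∧ a = kv.1.2 ∧ b = kv.1.1 then some kv.2
      else if a = kv.1.1 ∧ b = kv.1.2 then some kv.2
      else pvRget w a b := by
  obtain ⟨⟨x, y⟩, v⟩ := kv
  simp only [pvRowsStep, pvRget]
  by_cases hc : d.contains (y, x) = true
  · rw [if_pos hc, if_neg (by rintro ⟨hcf, -, -⟩; rw [hc] at hcf; simp at hcf)]
    rw [PySem.Dict.getD_modify]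
    by_cases hax : a = x
    · rw [if_pos hax, PySem.Dict.get?_insert]
      by_cases hby : b = y
      · rw [if_pos hby, if_pos ⟨hax, hby⟩]
      · rw [if_neg hby, if_neg (by rintro ⟨-, h⟩; exact hby h), hax]
    · rw [if_neg hax, if_neg (by rintro ⟨h, -⟩; exact hax h)]
  · have hc' : d.contains (y, x) = false := by simpa using hc
    rw [if_neg hc, PySem.Dict.getD_modify]
    by_cases hay : a = y
    · rw [if_pos hay, PySem.Dict.get?_insert]
      by_cases hbx : b = x
      · rw [if_pos hbx, if_pos ⟨hc', hay, hbx⟩]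
      · rw [if_neg hbx, if_neg (by rintro ⟨-, -, h⟩; exact hbx h)]
        rw [PySem.Dict.getD_modify]
        by_cases hyx : y = x
        · rw [if_pos hyx, PySem.Dict.get?_insert]
          by_cases hby : b = y
          · rw [if_pos hby, if_pos ⟨hay.trans hyx, hby⟩]
          · rw [if_neg hby, if_neg (by rintro ⟨-, h⟩; exact hby h), hay, hyx]
        · rw [if_neg hyx, if_neg (by rintro ⟨h, -⟩; exact hyx (hay ▸ h)), hay]
    · rw [if_neg hay, if_neg (by rintro ⟨-, h, -⟩; exact hay h)]
      rw [PySem.Dict.getD_modify]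
      by_cases hax : a = x
      · rw [if_pos hax, PySem.Dict.get?_insert]
        by_cases hby : b = y
        · rw [if_pos hby, if_pos ⟨hax, hby⟩]
        · rw [if_neg hby, if_neg (by rintro ⟨-, h⟩; exact hby h), hax]
      · rw [if_neg hax, if_neg (by rintro ⟨h, -⟩; exact hax h)]

-- the value the pass over l leaves at cell (a, b): exact key first, else the mirrored key
def pvF (d : PySem.Dict (String × String) Int) (l : List ((String × String) × Int))
    (a b : String) : Option Int :=
  if (a, b) ∈ l.map (·.1) then d.get? (a, b)
  else if (b, a) ∈ l.map (·.1) ∧ d.contains (a, b) = false then d.get? (b, a)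
  else none

theorem pvRowsFoldGet (d : PySem.Dict (String × String) Int) (l : List ((String × String) × Int))
    (H : ∀ kv ∈ l, d.get? kv.1 = some kv.2) (a b : String)
    (acc : PySem.Dict String (PySem.Dict String Int)) :
    pvRget (l.foldl (pvRowsStep d) acc) a b = (pvF d l a b).or (pvRget acc a b) := by
  induction l using List.reverseRecOn with
  | nil => simp [pvF]
  | append_singleton t kv ih =>
    obtain ⟨⟨x, y⟩, v⟩ := kv
    have hv : d.get? (x, y) = some v :=
      H ((x, y), v) (List.mem_append_right t (List.mem_singleton_self _))
    have Ht : ∀ kv ∈ t, d.get? kv.1 = some kv.2 := fun kv hkv => H kv (List.mem_append_left _ hkv)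
    have hcxy : d.contains (x, y) = true := by
      rw [PySem.Dict.contains_eq_isSome_get?, hv]; rfl
    have hmemc : ∀ p ∈ t.map (·.1), d.contains p = true := by
      intro p hp
      rw [List.mem_map] at hp
      obtain ⟨kv, hkv, hpe⟩ := hp
      rw [PySem.Dict.contains_eq_isSome_get?, ← hpe, Ht kv hkv]; rfl
    have hmap : (t ++ [((x, y), v)]).map (·.1) = t.map (·.1) ++ [(x, y)] := by
      rw [List.map_append]; rfl
    rw [List.foldl_append, List.foldl_cons, List.foldl_nil, pvRgetStep, ih Ht]
    by_cases h1 : a = x ∧ b = y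
    · obtain ⟨ha, hb⟩ := h1
      subst ha; subst hb
      have hF : pvF d (t ++ [((a, b), v)]) a b = some v := by
        unfold pvF
        rw [if_pos (by rw [hmap]; exact List.mem_append_right _ (List.mem_singleton_self _)), hv]
      rw [hF]
      have hnm : ¬ (d.contains (b, a) = false ∧ a = b ∧ b = a) := by
        rintro ⟨hcf, hab, -⟩
        subst hab
        rw [hcxy] at hcf
        simp at hcf
      rw [if_neg hnm, if_pos ⟨rfl, rfl⟩]
      simp
    · by_cases h2 : a = y ∧ b = x
      · obtain ⟨ha2, hb2⟩ := h2
        subst ha2; subst hb2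
        -- now the entry is ((b, a), v)
        by_cases hc : d.contains (a, b) = true
        · rw [if_neg (by rintro ⟨hcf, -, -⟩; rw [hc] at hcf; simp at hcf),
            if_neg h1]
          have hFF : pvF d (t ++ [((b, a), v)]) a b = pvF d t a b := by
            unfold pvF
            rw [hmap]
            by_cases hm : (a, b) ∈ t.map (·.1)
            · rw [if_pos (List.mem_append_left _ hm), if_pos hm]
            · have hnm1 : (a, b) ∉ t.map (·.1) ++ [(b, a)] := by
                intro hmem
                rcases List.mem_append.mp hmem with h | h
                · exact hm h
                · have hp := List.mem_singleton.mp h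
                  rw [Prod.mk.injEq] at hp
                  exact h1 hp
              rw [if_neg hnm1, if_neg hm,
                if_neg (by rintro ⟨-, hcf⟩; rw [hc] at hcf; simp at hcf),
                if_neg (by rintro ⟨-, hcf⟩; rw [hc] at hcf; simp at hcf)]
          rw [hFF]
        · have hc' : d.contains (a, b) = false := by simpa using hc
          rw [if_pos ⟨hc', rfl, rfl⟩]
          have hF : pvF d (t ++ [((b, a), v)]) a b = some v := by
            unfold pvF
            rw [hmap]
            have hnm1 : (a, b) ∉ t.map (·.1) ++ [(b, a)] := by
              intro hmem
              rcases List.mem_append.mp hmem with h | h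
              · have := hmemc _ h
                rw [hc'] at this
                simp at this
              · have hp := List.mem_singleton.mp h
                rw [Prod.mk.injEq] at hp
                obtain ⟨hab, -⟩ := hp
                subst hab
                rw [hcxy] at hc'
                simp at hc'
            rw [if_neg hnm1,
              if_pos ⟨List.mem_append_right _ (List.mem_singleton_self _), hc'⟩, hv]
          rw [hF]
          simp
      · rw [if_neg (by rintro ⟨-, h, h'⟩; exact h2 ⟨h, h'⟩), if_neg h1]
        have hFF : pvF d (t ++ [((x, y), v)]) a b = pvF d t a b := by
          unfold pvF
          rw [hmap]
          have e1 : ((a, b) ∈ t.map (·.1) ++ [(x, y)]) ↔ (a, b) ∈ t.map (·.1) := by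
            rw [List.mem_append, List.mem_singleton]
            constructor
            · rintro (h | h)
              · exact h
              · rw [Prod.mk.injEq] at h
                exact absurd h h1
            · exact Or.inl
          have e2 : ((b, a) ∈ t.map (·.1) ++ [(x, y)]) ↔ (b, a) ∈ t.map (·.1) := by
            rw [List.mem_append, List.mem_singleton]
            constructor
            · rintro (h | h)
              · exact h
              · rw [Prod.mk.injEq] at h
                exact absurd ⟨h.2, h.1⟩ h2
            · exact Or.inl
          simp only [e1, e2]
        rw [hFF]
theorem pvDictNodup (blosum : List (String × String × Int)) : (pvDictOf blosum).keys.Nodup := by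
  unfold pvDictOf
  exact PySem.Dict.nodup_keys_foldl_insert_key blosum (fun t => (t.1, t.2.1)) (fun _ t => t.2.2)
    PySem.Dict.empty (by rw [PySem.Dict.keys_empty]; exact List.nodup_nil)

theorem pvRowsGet (d : PySem.Dict (String × String) Int) (hnd : d.keys.Nodup) (a b : String) :
    pvRget (d.items.foldl (pvRowsStep d) PySem.Dict.empty) a b = pvOr d a b := by
  have H : ∀ kv ∈ d.items, d.get? kv.1 = some kv.2 := by
    intro kv hkv
    obtain ⟨k, v⟩ := kv
    exact PySem.Dict.get?_of_mem_items d hkv hnd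
  rw [pvRowsFoldGet d d.items H a b PySem.Dict.empty]
  have hracc : pvRget PySem.Dict.empty a b = none := by
    simp [pvRget, PySem.Dict.getD_empty, PySem.Dict.get?_empty]
  rw [hracc, Option.or_none]
  unfold pvF pvOr
  have hkeys : d.items.map (·.1) = d.keys := rfl
  rw [hkeys]
  by_cases h1 : d.contains (a, b) = true
  · rw [if_pos ((PySem.Dict.contains_iff_mem_keys d _).mp h1)]
    have hsome : (d.get? (a, b)).isSome = true := by
      rw [← PySem.Dict.contains_eq_isSome_get?]; exact h1
    obtain ⟨v, hv⟩ := Option.isSome_iff_exists.mp hsome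
    rw [hv]; rfl
  · have h1' : d.contains (a, b) = false := by simpa using h1
    have hget : d.get? (a, b) = none := by
      rw [PySem.Dict.contains_eq_isSome_get?] at h1'
      exact Option.not_isSome_iff_eq_none.mp (by simp [h1'])
    rw [if_neg (fun hm => h1 ((PySem.Dict.contains_iff_mem_keys d _).mpr hm)), hget, Option.none_or]
    by_cases h2 : (b, a) ∈ d.keys
    · rw [if_pos ⟨h2, h1'⟩]
    · rw [if_neg (by rintro ⟨hm, -⟩; exact h2 hm),
        (PySem.Dict.get?_eq_none_iff_not_mem_keys d _).mpr h2]

theorem pvModifyKeys (w : PySem.Dict String (PySem.Dict String Int)) (k : String)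
    (e : PySem.Dict String Int) (f : PySem.Dict String Int → PySem.Dict String Int) :
    (PySem.Dict.modify w k e f).keys = PySem.Set.add w.keys k := by
  rw [PySem.Dict.keys_modify]
  by_cases hc : w.contains k = true
  · rw [PySem.Dict.keys_insert_of_contains _ _ hc,
      PySem.Set.add_of_mem ((PySem.Dict.contains_iff_mem_keys w k).mp hc)]
  · have hc' : w.contains k = false := by simpa using hc
    rw [PySem.Dict.keys_insert_of_not_contains _ _ hc',
      PySem.Set.add_of_not_mem (fun hm => by
        rw [(PySem.Dict.contains_iff_mem_keys w k).mpr hm] at hc'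
        simp at hc')]

-- the keys B's single pass writes, in write order
def pvWriteKeys (d : PySem.Dict (String × String) Int) (l : List ((String × String) × Int)) :
    List String :=
  l.flatMap (fun kv => [kv.1.1] ++ if d.contains (kv.1.2, kv.1.1) then [] else [kv.1.2])

theorem pvRowsKeys (d : PySem.Dict (String × String) Int) (l : List ((String × String) × Int)) :
    ∀ acc, (l.foldl (pvRowsStep d) acc).keys = PySem.Set.update acc.keys (pvWriteKeys d l) := by
  induction l with
  | nil => intro acc; simp [pvWriteKeys, PySem.Set.update_nil]
  | cons kv t ih =>
    intro acc
    rw [List.foldl_cons, ih]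
    have hstep : (pvRowsStep d acc kv).keys
        = PySem.Set.update acc.keys
            ([kv.1.1] ++ if d.contains (kv.1.2, kv.1.1) then [] else [kv.1.2]) := by
      unfold pvRowsStep
      by_cases hc : d.contains (kv.1.2, kv.1.1) = true
      · rw [if_pos hc, pvModifyKeys, if_pos hc]
        rw [show [kv.1.1] ++ ([] : List String) = [kv.1.1] from rfl,
          PySem.Set.update_cons, PySem.Set.update_nil]
      · rw [if_neg hc, pvModifyKeys, pvModifyKeys, if_neg hc]
        rw [show [kv.1.1] ++ [kv.1.2] = kv.1.1 :: [kv.1.2] from rfl,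
          PySem.Set.update_cons, PySem.Set.update_cons, PySem.Set.update_nil]
    rw [hstep, ← PySem.Set.update_append]
    show _ = PySem.Set.update acc.keys (pvWriteKeys d (kv :: t))
    unfold pvWriteKeys
    rw [List.flatMap_cons]

theorem pvRowsKeysNodup (d : PySem.Dict (String × String) Int) :
    (d.items.foldl (pvRowsStep d) PySem.Dict.empty).keys.Nodup := by
  rw [pvRowsKeys, PySem.Dict.keys_empty, PySem.Set.update_nil_left]
  exact PySem.Set.nodup_ofList _

theorem pvRowsKeysMem (d : PySem.Dict (String × String) Int) (a : String) :
    a ∈ (d.items.foldl (pvRowsStep d) PySem.Dict.empty).keys ↔ a ∈ pvSymList d := by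
  rw [pvRowsKeys, PySem.Dict.keys_empty, PySem.Set.update_nil_left, PySem.Set.mem_ofList]
  unfold pvWriteKeys pvSymList
  constructor
  · intro h
    rw [List.mem_flatMap] at h ⊢
    obtain ⟨kv, hkv, hmem⟩ := h
    refine ⟨kv, hkv, ?_⟩
    rcases List.mem_append.mp hmem with h | h
    · rw [List.mem_singleton.mp h]; exact List.mem_cons_self
    · by_cases hc : d.contains (kv.1.2, kv.1.1) = true
      · rw [if_pos hc] at h; exact absurd h (List.not_mem_nil)
      · rw [if_neg hc] at h
        rw [List.mem_singleton.mp h]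
        exact List.mem_cons_of_mem _ List.mem_cons_self
  · intro h
    rw [List.mem_flatMap] at h ⊢
    obtain ⟨kv, hkv, hmem⟩ := h
    rcases List.mem_cons.mp hmem with h | h
    · exact ⟨kv, hkv, by rw [h]; exact List.mem_append_left _ List.mem_cons_self⟩
    · have ha : a = kv.1.2 := List.mem_singleton.mp (by simpa using h)
      by_cases hc : d.contains (kv.1.2, kv.1.1) = true
      · have hsome : (d.get? (kv.1.2, kv.1.1)).isSome = true := by
          rw [← PySem.Dict.contains_eq_isSome_get?]; exact hc
        obtain ⟨w, hw⟩ := Option.isSome_iff_exists.mp hsome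
        refine ⟨((kv.1.2, kv.1.1), w), PySem.Dict.mem_items_of_get?_eq_some d hw, ?_⟩
        rw [ha]
        exact List.mem_append_left _ List.mem_cons_self
      · refine ⟨kv, hkv, ?_⟩
        rw [ha]
        refine List.mem_append_right _ ?_
        rw [if_neg hc]
        exact List.mem_cons_self

theorem pvRowsRowNodup (d : PySem.Dict (String × String) Int)
    (l : List ((String × String) × Int)) :
    ∀ acc, (∀ x : String, (acc.getD x PySem.Dict.empty).keys.Nodup) →
      ∀ x : String, ((l.foldl (pvRowsStep d) acc).getD x PySem.Dict.empty).keys.Nodup := by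
  induction l with
  | nil => intro acc h x; exact h x
  | cons kv t ih =>
    intro acc h x
    rw [List.foldl_cons]
    apply ih
    intro z
    unfold pvRowsStep
    by_cases hc : d.contains (kv.1.2, kv.1.1) = true
    · rw [if_pos hc, PySem.Dict.getD_modify]
      by_cases hz : z = kv.1.1
      · rw [if_pos hz]; exact PySem.Dict.nodup_keys_insert _ _ _ (h _)
      · rw [if_neg hz]; exact h z
    · rw [if_neg hc, PySem.Dict.getD_modify]
      by_cases hz2 : z = kv.1.2
      · rw [if_pos hz2]
        apply PySem.Dict.nodup_keys_insert
        rw [PySem.Dict.getD_modify]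
        by_cases hz1 : kv.1.2 = kv.1.1
        · rw [if_pos hz1]; exact PySem.Dict.nodup_keys_insert _ _ _ (h _)
        · rw [if_neg hz1]; exact h _
      · rw [if_neg hz2, PySem.Dict.getD_modify]
        by_cases hz1 : z = kv.1.1
        · rw [if_pos hz1]; exact PySem.Dict.nodup_keys_insert _ _ _ (h _)
        · rw [if_neg hz1]; exact h z

-- a filterMap of optional cell values is the filtered key list paired with any matching values
theorem pvFilterMapEq (f : String → Option Int) (g : String → Int) (l : List String)
    (h : ∀ b v, f b = some v → g b = v) :
    l.filterMap (fun b => (f b).map (fun v => (b, v)))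
      = (l.filter (fun b => (f b).isSome)).map (fun b => (b, g b)) := by
  induction l with
  | nil => rfl
  | cons b t ih =>
    rw [List.filterMap_cons, List.filter_cons]
    cases hb : f b with
    | none => simp [ih]
    | some v => simp [ih, h b v hb]
theorem pvOrMemSym (d : PySem.Dict (String × String) Int) (a b : String)
    (h : (pvOr d a b).isSome = true) : b ∈ pvSymList d := by
  unfold pvOr at h
  cases h1 : d.get? (a, b) with
  | some v =>
    have hm := PySem.Dict.mem_items_of_get?_eq_some d h1
    unfold pvSymList
    rw [List.mem_flatMap]
    exact ⟨((a, b), v), hm, by simp⟩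
  | none =>
    rw [h1, Option.none_or] at h
    obtain ⟨v, hv⟩ := Option.isSome_iff_exists.mp h
    have hm := PySem.Dict.mem_items_of_get?_eq_some d hv
    unfold pvSymList
    rw [List.mem_flatMap]
    exact ⟨((b, a), v), hm, by simp⟩

theorem pvCellIsSome (d : PySem.Dict (String × String) Int) (gap : Int) (a b : String)
    (ha : a ≠ "-") : ((pvCell d gap a b).isSome = true) ↔ (b = "-" ∨ (pvOr d a b).isSome = true) := by
  unfold pvCell
  by_cases hb : b = "-"
  · simp [hb]
  · have hno : ¬(a = "-" ∨ b = "-") := by rintro (h | h); exact ha h; exact hb h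
    rw [if_neg hno,
      show (d.get? (a, b)).or (d.get? (b, a)) = pvOr d a b from rfl]
    simp [hb]

theorem pvMemKeysIsSome (r : PySem.Dict String Int) (f : String → Option Int)
    (hr : ∀ b, r.get? b = f b) (z : String) : z ∈ r.keys ↔ (f z).isSome = true := by
  constructor
  · intro h
    cases ho : f z with
    | none =>
      exact absurd h ((PySem.Dict.get?_eq_none_iff_not_mem_keys r z).mp (by rw [hr, ho]))
    | some v => rfl
  · intro hs
    by_contra hm
    have := (PySem.Dict.get?_eq_none_iff_not_mem_keys r z).mpr hm
    rw [hr] at this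
    rw [this] at hs
    simp at hs

-- the shared assembly of B's output from the distinct-symbol list
theorem pvBOuter (d : PySem.Dict (String × String) Int) (gap : Int)
    (rows : PySem.Dict String (PySem.Dict String Int)) (SS : List String)
    (cols : String → List String)
    (hSSnodup : SS.Nodup)
    (hrget : ∀ a b, (rows.getD a PySem.Dict.empty).get? b = pvOr d a b)
    (hcols : ∀ a, a ≠ "-" → cols a = SS.filter (fun b => (pvCell d gap a b).isSome)) :
    (SS.foldl (fun W a =>
        if a = "-" then W.insert a (SS.foldl (fun r b => r.insert b gap) PySem.Dict.empty)
        else W.insert a ((cols a).foldl (fun r b =>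
            r.insert b (if b = "-" then gap else (rows.getD a PySem.Dict.empty).getD b 0))
            PySem.Dict.empty))
      PySem.Dict.empty).items.map (fun p => (p.1, p.2.items))
    = SS.map (fun a =>
        (a, SS.filterMap (fun b => (pvCell d gap a b).map (fun v => (b, v))))) := by
  have hfun : (fun (W : PySem.Dict String (PySem.Dict String Int)) (a : String) =>
      if a = "-" then W.insert a (SS.foldl (fun r b => r.insert b gap) PySem.Dict.empty)
      else W.insert a ((cols a).foldl (fun r b =>
          r.insert b (if b = "-" then gap else (rows.getD a PySem.Dict.empty).getD b 0))
          PySem.Dict.empty))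
      = fun W a => W.insert a
          (if a = "-" then SS.foldl (fun r b => r.insert b gap) PySem.Dict.empty
           else (cols a).foldl (fun r b =>
              r.insert b (if b = "-" then gap else (rows.getD a PySem.Dict.empty).getD b 0))
              PySem.Dict.empty) := by
    funext W a
    by_cases hadash : a = "-" <;> simp [hadash]
  rw [hfun, PySem.Dict.items_foldl_insert_fresh SS (fun a => a) _ PySem.Dict.empty
    (fun a _ => rfl) (by simpa using hSSnodup)]
  rw [show (PySem.Dict.empty : PySem.Dict String (PySem.Dict String Int)).items = [] from rfl,
    List.nil_append, List.map_map]
  apply List.map_congr_left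
  intro a _
  simp only [Function.comp]
  by_cases hadash : a = "-"
  · subst hadash
    rw [if_pos rfl]
    have hfilter : SS.filter (fun b => (pvCell d gap "-" b).isSome) = SS :=
      List.filter_eq_self.mpr (fun b _ => by unfold pvCell; rw [if_pos (Or.inl rfl)]; rfl)
    have h1 : (SS.foldl (fun r b => r.insert b gap) PySem.Dict.empty).items
        = SS.map (fun b => (b, gap)) := by
      rw [PySem.Dict.items_foldl_insert_fresh SS (fun b => b) (fun _ => gap) PySem.Dict.empty
        (fun b _ => rfl) (by simpa using hSSnodup)]
      simp [show (PySem.Dict.empty : PySem.Dict String Int).items = [] from rfl]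
    have hprop : ∀ b v, pvCell d gap "-" b = some v → (fun _ : String => gap) b = v := by
      intro b v hv
      unfold pvCell at hv
      rw [if_pos (Or.inl rfl)] at hv
      exact Option.some_inj.mp hv
    have h2 := pvFilterMapEq (pvCell d gap "-") (fun _ => gap) SS hprop
    rw [hfilter] at h2
    rw [h1, h2]
  · rw [if_neg hadash, hcols a hadash]
    have h1 : ((SS.filter (fun b => (pvCell d gap a b).isSome)).foldl (fun r b =>
          r.insert b (if b = "-" then gap else (rows.getD a PySem.Dict.empty).getD b 0))
          PySem.Dict.empty).items
        = (SS.filter (fun b => (pvCell d gap a b).isSome)).map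
            (fun b => (b, if b = "-" then gap else (rows.getD a PySem.Dict.empty).getD b 0)) := by
      rw [PySem.Dict.items_foldl_insert_fresh (SS.filter (fun b => (pvCell d gap a b).isSome))
        (fun b => b) _ PySem.Dict.empty (fun b _ => rfl)
        (by simpa using hSSnodup.filter _)]
      simp [show (PySem.Dict.empty : PySem.Dict String Int).items = [] from rfl]
    have h2 : SS.filterMap (fun b => (pvCell d gap a b).map (fun v => (b, v)))
        = (SS.filter (fun b => (pvCell d gap a b).isSome)).map
            (fun b => (b, if b = "-" then gap else (rows.getD a PySem.Dict.empty).getD b 0)) := by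
      apply pvFilterMapEq
      intro b v hv
      dsimp only
      unfold pvCell at hv
      by_cases hb : b = "-"
      · rw [if_pos (Or.inr hb)] at hv
        rw [if_pos hb]
        exact Option.some_inj.mp hv
      · have hno : ¬(a = "-" ∨ b = "-") := by rintro (h | h); exact hadash h; exact hb h
        rw [if_neg hno] at hv
        have hv2 : pvOr d a b = some v := hv
        rw [if_neg hb, PySem.Dict.getD_eq_get?_getD, hrget a b, hv2]
        rfl
    rw [h1, h2]

theorem pvAEq (blosum : List (String × String × Int)) (gap_score : Int) :
    blosum_to_nested blosum gap_score = pvCanon blosum gap_score := by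
  simp only [blosum_to_nested, pvCanon, pvS, pvSymList]
  rw [pvSymbolsFold, show (PySem.Set.empty : PySem.Set String) = [] from rfl,
    PySem.Set.update_nil_left]
  set d := pvDictOf blosum with hd
  set S : List String :=
    (PySem.List.sorted (PySem.Set.ofList (d.items.flatMap (fun kv => [kv.1.1, kv.1.2])))
      (fun x => x) false) ++ ["-"] with hS
  have hAfun : (fun (w : PySem.Dict String (PySem.Dict String Int)) (a : String) =>
      S.foldl (fun w b =>
        if a = "-" ∨ b = "-" then
          PySem.Dict.modify w a PySem.Dict.empty (fun row => row.insert b gap_score)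
        else
          match d.get? (a, b) with
          | some v => PySem.Dict.modify w a PySem.Dict.empty (fun row => row.insert b v)
          | none =>
            match d.get? (b, a) with
            | some v => PySem.Dict.modify w a PySem.Dict.empty (fun row => row.insert b v)
            | none => w) w)
      = (fun w a => S.foldl (fun w b =>
          match pvCell d gap_score a b with
          | some v => PySem.Dict.modify w a PySem.Dict.empty (fun r => r.insert b v)
          | none => w) w) := by
    funext w a
    apply congrArg (fun f => List.foldl f w S)
    funext w' b
    by_cases hab : a = "-" ∨ b = "-"
    · simp [pvCell, hab]
    · cases h1 : d.get? (a, b) with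
      | some v => simp [pvCell, hab, h1]
      | none =>
        cases h2 : d.get? (b, a) with
        | some v => simp [pvCell, hab, h1, h2]
        | none => simp [pvCell, hab, h1, h2]
  rw [hAfun]
  have hA := pvAOuterInv (pvCell d gap_score) S S (fun _ => PySem.Dict.empty)
    (S.foldl (fun w a => w.insert a PySem.Dict.empty) PySem.Dict.empty)
    (pvFoldInsertItems (fun _ => PySem.Dict.empty) S)
    (fun a ha => by rw [PySem.List.dedup_eq_ofList, PySem.Set.mem_ofList]; exact ha)
    (fun a _ => rfl)
  rw [hA, List.map_map]
  apply List.map_congr_left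
  intro a ha
  have haS : a ∈ S := by
    rw [PySem.List.dedup_eq_ofList, PySem.Set.mem_ofList] at ha
    exact ha
  simp only [Function.comp]
  rw [if_pos haS, pvRowfoldItems]
theorem pvBEq (blosum : List (String × String × Int)) (gap_score : Int) :
    blosum_to_nested_alt blosum gap_score = pvCanon blosum gap_score := by
  simp only [blosum_to_nested_alt, pvCanon]
  set d := pvDictOf blosum with hd
  have hnd : d.keys.Nodup := pvDictNodup blosum
  set rows := List.foldl (pvRowsStep d) PySem.Dict.empty d.items with hrows
  have hrowsnodup : rows.keys.Nodup := by rw [hrows]; exact pvRowsKeysNodup d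
  have hrget : ∀ a b, (rows.getD a PySem.Dict.empty).get? b = pvOr d a b := by
    intro a b; rw [hrows]; exact pvRowsGet d hnd a b
  have hrowsmem : ∀ z, z ∈ rows.keys ↔ z ∈ pvSymList d := by
    intro z; rw [hrows]; exact pvRowsKeysMem d z
  have hrownodup : ∀ a, (rows.getD a PySem.Dict.empty).keys.Nodup := by
    intro a; rw [hrows]
    refine pvRowsRowNodup d d.items PySem.Dict.empty (fun x => ?_) a
    rw [PySem.Dict.getD_empty, PySem.Dict.keys_empty]
    exact List.nodup_nil
  have hrowmem : ∀ a z, z ∈ (rows.getD a PySem.Dict.empty).keys ↔ (pvOr d a z).isSome = true :=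
    fun a z => pvMemKeysIsSome (rows.getD a PySem.Dict.empty) (pvOr d a) (hrget a) z
  have hsortnodup : (PySem.List.sorted (PySem.Set.ofList (pvSymList d)) (fun x => x) false).Nodup :=
    (PySem.List.sorted_perm (PySem.Set.ofList (pvSymList d)) (fun x => x) false).symm.nodup
      (PySem.Set.nodup_ofList _)
  have hsortmem : ∀ z, z ∈ PySem.List.sorted (PySem.Set.ofList (pvSymList d)) (fun x => x) false
      ↔ z ∈ pvSymList d := by
    intro z; rw [PySem.List.mem_sorted, PySem.Set.mem_ofList]
  have hpw := PySem.List.sorted_ofList_pairwise_lt (pvSymList d)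
  have hsortedrows : PySem.List.sorted rows.keys (fun x => x) false
      = PySem.List.sorted (PySem.Set.ofList (pvSymList d)) (fun x => x) false := by
    apply PySem.List.sorted_eq_sorted_of_perm _ _ (fun x => x) (fun _ _ h => h)
    exact List.perm_of_nodup_nodup_toFinset_eq hrowsnodup (PySem.Set.nodup_ofList (pvSymList d))
      (by
        ext z
        simp only [List.mem_toFinset]
        rw [hrowsmem z, PySem.Set.mem_ofList])
  have hrowkeymem : ∀ a z, z ∈ (rows.getD a PySem.Dict.empty).keys → z ∈ pvSymList d :=
    fun a z hz => pvOrMemSym d a z ((hrowmem a z).mp hz)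
  by_cases hg : "-" ∈ pvSymList d
  · have hcont : rows.contains "-" = true := by
      rw [PySem.Dict.contains_iff_mem_keys]
      exact (hrowsmem "-").mpr hg
    have hSS : PySem.List.dedup (pvS d)
        = PySem.List.sorted (PySem.Set.ofList (pvSymList d)) (fun x => x) false := by
      show PySem.List.dedup
          (PySem.List.sorted (PySem.Set.ofList (pvSymList d)) (fun x => x) false ++ ["-"]) = _
      rw [PySem.List.dedup_eq_ofList, PySem.Set.ofList_append_singleton,
        pvOfListSelf _ hsortnodup, PySem.Set.add_of_mem ((hsortmem "-").mpr hg)]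
    simp only [hcont, hSS, hsortedrows, if_true, List.append_nil]
    refine pvBOuter d gap_score rows _
      (fun a => PySem.List.sorted
        (PySem.Set.add (PySem.Set.ofList ((rows.getD a PySem.Dict.empty).keys)) "-")
        (fun x => x) false)
      hsortnodup hrget ?_
    intro a hadash
    dsimp only
    apply PySem.List.sorted_eq_of_perm_of_pairwise_lt
    · apply List.perm_of_nodup_nodup_toFinset_eq (hsortnodup.filter _)
        (PySem.Set.nodup_add (PySem.Set.ofList ((rows.getD a PySem.Dict.empty).keys)) "-"
          (PySem.Set.nodup_ofList ((rows.getD a PySem.Dict.empty).keys)))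
      ext z
      simp only [List.mem_toFinset, List.mem_filter, PySem.Set.mem_add, PySem.Set.mem_ofList]
      constructor
      · rintro ⟨hz, hp⟩
        rcases (pvCellIsSome d gap_score a z hadash).mp hp with h | h
        · exact Or.inr h
        · exact Or.inl ((hrowmem a z).mpr h)
      · rintro (h | h)
        · exact ⟨(hsortmem z).mpr (hrowkeymem a z h),
            (pvCellIsSome d gap_score a z hadash).mpr (Or.inr ((hrowmem a z).mp h))⟩
        · exact ⟨(hsortmem z).mpr (by rw [h]; exact hg),
            (pvCellIsSome d gap_score a z hadash).mpr (Or.inl h)⟩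
    · exact hpw.filter _
  · have hcont : rows.contains "-" = false := by
      rw [← Bool.not_eq_true, PySem.Dict.contains_iff_mem_keys]
      intro hm
      exact hg ((hrowsmem "-").mp hm)
    have hSS : PySem.List.dedup (pvS d)
        = PySem.List.sorted (PySem.Set.ofList (pvSymList d)) (fun x => x) false ++ ["-"] := by
      show PySem.List.dedup
          (PySem.List.sorted (PySem.Set.ofList (pvSymList d)) (fun x => x) false ++ ["-"]) = _
      rw [PySem.List.dedup_eq_ofList, PySem.Set.ofList_append_singleton,
        pvOfListSelf _ hsortnodup,
        PySem.Set.add_of_not_mem (fun hm => hg ((hsortmem "-").mp hm))]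
    have hSSnodup : (PySem.List.sorted (PySem.Set.ofList (pvSymList d)) (fun x => x) false
        ++ ["-"]).Nodup := by
      rw [List.nodup_append]
      refine ⟨hsortnodup, List.nodup_singleton _, ?_⟩
      intro z hz w hw heq
      rw [List.mem_singleton] at hw
      rw [heq, hw] at hz
      exact hg ((hsortmem "-").mp hz)
    simp only [hcont, hSS, hsortedrows, Bool.false_eq_true, if_false]
    refine pvBOuter d gap_score rows _
      (fun a => PySem.List.sorted ((rows.getD a PySem.Dict.empty).keys) (fun x => x) false
        ++ ["-"])
      hSSnodup hrget ?_
    intro a hadash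
    dsimp only
    have hpdash : (pvCell d gap_score a "-").isSome = true := by
      unfold pvCell; rw [if_pos (Or.inr rfl)]; rfl
    rw [List.filter_append, List.filter_singleton, hpdash, cond_true]
    congr 1
    apply PySem.List.sorted_eq_of_perm_of_pairwise_lt
    · apply List.perm_of_nodup_nodup_toFinset_eq (hsortnodup.filter _) (hrownodup a)
      ext z
      simp only [List.mem_toFinset, List.mem_filter]
      constructor
      · rintro ⟨hz, hp⟩
        rcases (pvCellIsSome d gap_score a z hadash).mp hp with h | h
        · exact absurd (h ▸ (hsortmem z).mp hz) hg
        · exact (hrowmem a z).mpr h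
      · intro h
        exact ⟨(hsortmem z).mpr (hrowkeymem a z h),
          (pvCellIsSome d gap_score a z hadash).mpr (Or.inr ((hrowmem a z).mp h))⟩
    · exact hpw.filter _

-- ===== VERDICT (by name: the statement is the Claim_ definition above) =====
theorem blosum_to_nested_spec : Claim_equal_blosum_to_nested := by
  intro blosum gap_score _
  unfold Spec_blosum_to_nested
  rw [pvAEq, pvBEq]
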